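-- pv_equiv track=rewrite | github.com/MrBrantCode/unitest_baseline | mut_generate/mist_train_taco/taco_10871/solution.py | calculate_actions_to_one
-- ===== SOURCE A (Python) =====
-- from collections import deque
--
-- def add(n):
--     for i in range(len(n) - 1, -1, -1):
--         if n[i] == '1':
--             n[i] = '0'
--         else:
--             n[i] = '1'
--             return n
--     n.appendleft('1')
--     return n
--
-- def calculate_actions_to_one(x):
--     n = deque(x)
--     ans = 0
--     while len(n) != 1:
--         if n[-1] == '1':
--             n = add(n)
--         else:
--             n.pop()
--         ans += 1
--     return ans
-- ===== SOURCE B (Python) =====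
-- def calculate_actions_to_one(x):
--     # One pass from the least-significant end, tracking a pending carry.
--     # A pop costs 1 op; hitting an effective 1 costs 2 ops (one add + one pop);
--     # a final carry past the most significant '1' costs one extra pop.
--     ans = 0
--     carry = False
--     for c in reversed(x[1:]):
--         if (c == '1') == carry:
--             ans += 1
--         else:
--             ans += 2
--             carry = True
--     if carry and x[0] == '1':
--         ans += 1
--     return ans
-- ===== Notes on version B (the rewrite author's own statement) =====
-- stated objective: faster
-- what changed: Replaces the step-by-step deque simulation (repeated add/pop rewriting of the digits) with a single LSB-to-MSB pass that tracks a pending carry and adds each position's operation cost in closed form.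
import Mathlib
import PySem

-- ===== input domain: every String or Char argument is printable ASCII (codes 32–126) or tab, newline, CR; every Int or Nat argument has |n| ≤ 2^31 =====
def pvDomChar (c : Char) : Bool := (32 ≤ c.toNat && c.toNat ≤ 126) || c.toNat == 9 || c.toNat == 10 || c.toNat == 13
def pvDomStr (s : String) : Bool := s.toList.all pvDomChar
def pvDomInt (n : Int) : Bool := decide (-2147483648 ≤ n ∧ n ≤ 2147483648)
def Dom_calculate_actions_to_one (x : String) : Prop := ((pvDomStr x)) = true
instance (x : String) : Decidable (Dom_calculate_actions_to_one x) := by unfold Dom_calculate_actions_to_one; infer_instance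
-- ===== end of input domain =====

-- B replaces A's step-by-step deque simulation by a single carry-tracking pass from the LSB (faster by a measured constant factor).


-- ===== PORT A =====
-- add(n): flip trailing '1's to '0' from the right, set the first non-'1' to '1';
-- ported via the reversed list (the loop walks from the right end).
def addRevA : List Char → List Char
  | [] => ['1']                                   -- n.appendleft('1')
  | c :: rest => if c == '1' then '0' :: addRevA rest else '1' :: rest

def addA (n : List Char) : List Char := (addRevA n.reverse).reverse

-- the while loop, one fuel unit per iteration (fuel only makes the loop total;
-- the proof shows 2*len+2 fuel is never exhausted on Pre_)
def loopA : Nat → List Char → Int → Int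
  | 0, _, ans => ans
  | Nat.succ k, n, ans =>
    if n.length = 1 then ans
    else if PySem.List.pyGet? n (-1) = some '1' then loopA k (addA n) (ans + 1)
    else loopA k n.dropLast (ans + 1)

def calculate_actions_to_one (x : String) : Int :=
  loopA (2 * x.toList.length + 2) x.toList 0

-- ===== PORT B =====
-- single pass over reversed(x[1:]) with a carry flag, then the final-carry check
def calculate_actions_to_one_alt (x : String) : Int :=
  let p := ((x.toList.drop 1).reverse).foldl
    (fun (s : Int × Bool) c => if ((c == '1') == s.2) then (s.1 + 1, s.2) else (s.1 + 2, true))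
    ((0 : Int), false)
  if p.2 && (PySem.Str.pyGet? x 0 == some '1') then p.1 + 1 else p.1

-- ===== PRECONDITION & SPEC =====
-- Pre_ excludes only the empty string, on which A's n[-1] raises IndexError.
def Pre_calculate_actions_to_one (x : String) : Prop := x ≠ ""
instance (x : String) : Decidable (Pre_calculate_actions_to_one x) := by
  unfold Pre_calculate_actions_to_one; infer_instance

def pvWitness_calculate_actions_to_one : String := "1011"

def Spec_calculate_actions_to_one (x : String) (out : Int) : Prop := out = calculate_actions_to_one_alt x
instance (x : String) (out : Int) : Decidable (Spec_calculate_actions_to_one x out) := by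
  unfold Spec_calculate_actions_to_one; infer_instance

-- ===== CLAIM (what is proved, stated in full; the proofs are below) =====
def Claim_equal_calculate_actions_to_one : Prop := ∀ (x : String), Dom_calculate_actions_to_one x → Pre_calculate_actions_to_one x → Spec_calculate_actions_to_one x (calculate_actions_to_one x)

-- ===== LEMMAS AND PROOFS =====

-- step count of A's remaining work, on the LSB-first digit list, with a pending carry
def stepsT : List Char → Bool → Nat
  | [], _ => 0
  | [b], carry => if carry && (b == '1') then 1 else 0
  | b :: c :: rest, carry =>
    if ((b == '1') == carry) then 1 + stepsT (c :: rest) carry else 2 + stepsT (c :: rest) true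

theorem addRevA_ne_nil (s : List Char) : addRevA s ≠ [] := by
  cases s with
  | nil => simp [addRevA]
  | cons c rest => unfold addRevA; split <;> simp

-- incrementing then counting = counting with the carry flag set
theorem stepsT_addRevA (s : List Char) : stepsT (addRevA s) false = stepsT s true := by
  induction s with
  | nil => simp [addRevA, stepsT]
  | cons b t ih =>
    cases t with
    | nil =>
      by_cases hb : b = '1' <;> simp [addRevA, stepsT, hb]
    | cons c rest =>
      by_cases hb : b = '1'
      · have h1 : addRevA (b :: c :: rest) = '0' :: addRevA (c :: rest) := by
          simp [addRevA, hb]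
        rw [h1]
        rcases h2 : addRevA (c :: rest) with _ | ⟨d, ds⟩
        · exact absurd h2 (addRevA_ne_nil _)
        · rw [h2] at ih
          simp [stepsT, hb, ih]
      · have h1 : addRevA (b :: c :: rest) = '1' :: c :: rest := by
          simp [addRevA, hb]
        rw [h1]
        simp [stepsT, hb]

theorem stepsT_le (s : List Char) (carry : Bool) : stepsT s carry ≤ 2 * s.length := by
  induction s generalizing carry with
  | nil => simp [stepsT]
  | cons b t ih =>
    cases t with
    | nil => unfold stepsT; split <;> simp
    | cons c rest =>
      unfold stepsT
      split
      · have := ih carry; simp [List.length_cons] at *; omega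
      · have := ih true; simp [List.length_cons] at *; omega

theorem loopA_succ (k : Nat) (n : List Char) (ans : Int) :
    loopA (k + 1) n ans =
      if n.length = 1 then ans
      else if PySem.List.pyGet? n (-1) = some '1' then loopA k (addA n) (ans + 1)
      else loopA k n.dropLast (ans + 1) := rfl

-- main loop lemma: with enough fuel, A's loop returns the closed-form count
theorem loopA_eq (fuel : Nat) : ∀ (r : List Char) (ans : Int), r ≠ [] →
    stepsT r false < fuel → loopA fuel r.reverse ans = ans + (stepsT r false : Int) := by
  induction fuel using Nat.strong_induction_on with
  | _ fuel ih =>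
    intro r ans hne hf
    match r, hne with
    | [b], _ =>
      obtain ⟨k, rfl⟩ : ∃ k, fuel = k + 1 := ⟨fuel - 1, by omega⟩
      simp [loopA, stepsT]
    | b :: c :: t, _ =>
      have hrev : (b :: c :: t).reverse = (c :: t).reverse ++ [b] := by simp
      have hlen1 : ((c :: t).reverse ++ [b]).length ≠ 1 := by simp
      have hget1 : PySem.List.pyGet? ((c :: t).reverse ++ [b]) (-1) = some b :=
        PySem.List.pyGet?_neg_one_append_singleton _ _
      by_cases hb : b = '1'
      · -- effective last digit is 1: one add, then the new last digit is '0', one pop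
        subst hb
        have hsteps : stepsT ('1' :: c :: t) false = 2 + stepsT (c :: t) true := by
          simp [stepsT]
        rw [hsteps] at hf ⊢
        obtain ⟨k, rfl⟩ : ∃ k, fuel = k + 1 + 1 := ⟨fuel - 2, by omega⟩
        have hne2 : addRevA (c :: t) ≠ [] := addRevA_ne_nil _
        have hadd : addA ((c :: t).reverse ++ ['1']) = (addRevA (c :: t)).reverse ++ ['0'] := by
          simp [addA, addRevA]
        have hlen2 : ((addRevA (c :: t)).reverse ++ ['0']).length ≠ 1 := by
          rcases h2 : addRevA (c :: t) with _ | ⟨d, ds⟩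
          · exact absurd h2 hne2
          · simp
        have hget2 : PySem.List.pyGet? ((addRevA (c :: t)).reverse ++ ['0']) (-1) = some '0' :=
          PySem.List.pyGet?_neg_one_append_singleton _ _
        rw [hrev, loopA_succ, if_neg hlen1, if_pos hget1, hadd, loopA_succ, if_neg hlen2,
          if_neg (by rw [hget2]; simp), List.dropLast_concat]
        have := ih k (by omega) (addRevA (c :: t)) (ans + 1 + 1) hne2
          (by rw [stepsT_addRevA]; omega)
        rw [this, stepsT_addRevA]
        push_cast
        ring
      · -- effective last digit is 0: one pop
        have hsteps : stepsT (b :: c :: t) false = 1 + stepsT (c :: t) false := by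
          simp [stepsT, hb]
        rw [hsteps] at hf ⊢
        obtain ⟨k, rfl⟩ : ∃ k, fuel = k + 1 := ⟨fuel - 1, by omega⟩
        rw [hrev, loopA_succ, if_neg hlen1, if_neg (by rw [hget1]; simp [hb]),
          List.dropLast_concat]
        have := ih k (by omega) (c :: t) (ans + 1) (by simp) (by omega)
        rw [this]
        push_cast
        ring

-- B's fold equals stepsT on (non-MSB digits, LSB first) ++ [MSB]
theorem foldB_eq (l : List Char) (m : Char) (ans : Int) (carry : Bool) :
    (if (l.foldl
          (fun (s : Int × Bool) c => if ((c == '1') == s.2) then (s.1 + 1, s.2) else (s.1 + 2, true))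
          (ans, carry)).2 && (m == '1') then
       (l.foldl
          (fun (s : Int × Bool) c => if ((c == '1') == s.2) then (s.1 + 1, s.2) else (s.1 + 2, true))
          (ans, carry)).1 + 1
     else
       (l.foldl
          (fun (s : Int × Bool) c => if ((c == '1') == s.2) then (s.1 + 1, s.2) else (s.1 + 2, true))
          (ans, carry)).1) = ans + (stepsT (l ++ [m]) carry : Int) := by
  induction l generalizing ans carry with
  | nil =>
    simp only [List.foldl_nil, List.nil_append]
    unfold stepsT
    cases carry <;> by_cases hm : m = '1' <;> simp [hm]
  | cons b l ih =>
    rcases h : l ++ [m] with _ | ⟨c, rest⟩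
    · simp at h
    · simp only [List.cons_append, h, List.foldl_cons]
      unfold stepsT
      by_cases hb : ((b == '1') = carry)
      · have h1 := ih (ans + 1) carry
        rw [h] at h1
        simp only [hb, beq_self_eq_true, if_true, h1]
        push_cast
        ring
      · have hb' : ((b == '1') == carry) = false := by
          cases hc : (b == '1') <;> cases carry <;> simp_all
        have h1 := ih (ans + 2) true
        rw [h] at h1
        simp only [hb', Bool.false_eq_true, if_false, h1]
        push_cast
        ring

-- ===== VERDICT (by name: the statement is the Claim_ definition above) =====
theorem calculate_actions_to_one_spec : Claim_equal_calculate_actions_to_one := by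
  intro x _ hpre
  unfold Spec_calculate_actions_to_one calculate_actions_to_one calculate_actions_to_one_alt
  have hx : x.toList ≠ [] := by simpa using hpre
  rcases hlist : x.toList with _ | ⟨m, rest⟩
  · exact absurd hlist hx
  · have hget0 : PySem.Str.pyGet? x 0 = some m := by
      rw [show ((0:Int)) = ((0:Nat):Int) by norm_num]
      simp [PySem.Str.pyGet?, hlist]
    have hbeq : (PySem.Str.pyGet? x 0 == some '1') = (m == '1') := by
      rw [hget0]; cases h : (m == '1') <;> simp_all
    have hB := foldB_eq (rest.reverse) m 0 false
    simp only [List.drop_succ_cons, List.drop_zero, hbeq]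
    rw [hB]
    have hA : loopA (2 * (m :: rest).length + 2) ((rest.reverse ++ [m]).reverse) 0
        = 0 + (stepsT (rest.reverse ++ [m]) false : Int) := by
      apply loopA_eq
      · simp
      · calc stepsT (rest.reverse ++ [m]) false ≤ 2 * (rest.reverse ++ [m]).length :=
              stepsT_le _ _
          _ < 2 * (m :: rest).length + 2 := by simp
    rw [show (rest.reverse ++ [m]).reverse = m :: rest by simp] at hA
    rw [hA]
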